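-- pv_equiv track=rewrite | github.com/Sierraki/Solutions | Leetcode/算法&Algorithm/题库/3199.用偶数异或设置位计数三元组 I.py | tripletCount
-- ===== SOURCE A (Python) =====
-- from typing import List
--
-- def tripletCount(a: List[int], b: List[int], c: List[int]) -> int:
--     def fun1(num=int) -> bool:
--         return bin(num)[2:].count("1") % 2 == 0
--
--     def fun2(nums=list) -> int:
--         ans = nums[0]
--         for i in range(1, len(nums)):
--             ans ^= nums[i]
--         return ans
--
--     ans = 0
--     for i in range(len(a)):
--         for j in range(len(b)):
--             for k in range(len(c)):
--                 if fun1(fun2([a[i], b[j], c[k]])):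
--                     ans += 1
--     return ans
-- ===== SOURCE B (Python) =====
-- def tripletCount(a, b, c):
--     cnt = {}
--     for y in b:
--         for z in c:
--             w = y ^ z
--             cnt[w] = cnt.get(w, 0) + 1
--     ans = 0
--     for x in a:
--         for w, m in cnt.items():
--             if bin(x ^ w).count("1") % 2 == 0:
--                 ans += m
--     return ans
-- ===== Notes on version B (the rewrite author's own statement) =====
-- stated objective: faster
-- what changed: Replaces the O(|a||b||c|) triple loop with a dict counting multiplicities of all pairwise xors b[j]^c[k], then for each a[i] sums the counts of the distinct xor values whose popcount with a[i] is even.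
import Mathlib
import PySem

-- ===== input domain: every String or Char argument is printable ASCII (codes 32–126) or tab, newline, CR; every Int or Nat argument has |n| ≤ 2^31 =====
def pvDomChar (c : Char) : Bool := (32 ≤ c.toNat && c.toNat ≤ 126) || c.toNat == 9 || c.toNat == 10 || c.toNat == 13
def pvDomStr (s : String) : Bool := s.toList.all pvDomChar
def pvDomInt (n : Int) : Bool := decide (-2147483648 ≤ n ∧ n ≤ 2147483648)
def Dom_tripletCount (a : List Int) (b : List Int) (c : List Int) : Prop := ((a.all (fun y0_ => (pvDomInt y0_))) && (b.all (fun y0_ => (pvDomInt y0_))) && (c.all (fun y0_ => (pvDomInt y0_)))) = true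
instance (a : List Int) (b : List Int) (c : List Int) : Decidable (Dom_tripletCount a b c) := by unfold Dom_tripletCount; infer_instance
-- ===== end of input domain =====

-- B replaces the O(|a||b||c|) triple loop by a dict of multiplicities of all pairwise xors b[j]^c[k],
-- then for each a[i] sums the multiplicities of the distinct xor values with even combined popcount (objective: faster).

-- ===== PORT A =====
-- model of Python's bin(n) for n > 0: most-significant-bit-first binary digit characters
def pvNatBits : Nat → List Char
  | 0 => []
  | n+1 => pvNatBits ((n+1)/2) ++ [if (n+1) % 2 = 1 then '1' else '0']
decreasing_by exact Nat.div_lt_self (Nat.succ_pos n) one_lt_two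

-- Python bin(num) as a character list ('-0b…' for negatives, '0b…' otherwise)
def pvBin (num : Int) : List Char :=
  (if num < 0 then ['-', '0', 'b'] else ['0', 'b']) ++
    (if num.natAbs = 0 then ['0'] else pvNatBits num.natAbs)

-- A's fun1: bin(num)[2:].count("1") % 2 == 0
def pvFun1 (num : Int) : Bool := ((pvBin num).drop 2).count '1' % 2 == 0

-- A's fun2: ans = nums[0]; for i in range(1, len(nums)): ans ^= nums[i]
-- (fun2 is only ever applied to a 3-element list, so nums[0] / nums[i] never raise; pyGetD's
-- default 0 is unreachable and only makes the transliteration total)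
def pvFun2 (nums : List Int) : Int :=
  (PySem.List.pyRange 1 (PySem.List.len nums) 1).foldl
    (fun ans i => PySem.Int.bxor ans (PySem.List.pyGetD nums i 0))
    (PySem.List.pyGetD nums 0 0)

def tripletCount (a : List Int) (b : List Int) (c : List Int) : Int :=
  (PySem.List.pyRange 0 (PySem.List.len a) 1).foldl (fun ans i =>
    (PySem.List.pyRange 0 (PySem.List.len b) 1).foldl (fun ans j =>
      (PySem.List.pyRange 0 (PySem.List.len c) 1).foldl (fun ans k =>
        if pvFun1 (pvFun2 [PySem.List.pyGetD a i 0, PySem.List.pyGetD b j 0, PySem.List.pyGetD c k 0])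
        then ans + 1 else ans) ans) ans) 0

-- ===== PORT B =====
-- B's parity test: bin(v).count("1") % 2 == 0
def pvEvenPopcount (v : Int) : Bool := (pvBin v).count '1' % 2 == 0

def tripletCount_alt (a : List Int) (b : List Int) (c : List Int) : Int :=
  let cnt := b.foldl (fun d y => c.foldl (fun d z =>
      let w := PySem.Int.bxor y z
      d.insert w (d.getD w 0 + 1)) d) PySem.Dict.empty
  a.foldl (fun ans x => cnt.items.foldl (fun ans p =>
      if pvEvenPopcount (PySem.Int.bxor x p.1) then ans + p.2 else ans) ans) 0

-- ===== PRECONDITION & SPEC =====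
def Spec_tripletCount (a : List Int) (b : List Int) (c : List Int) (out : Int) : Prop := out = tripletCount_alt a b c
instance (a : List Int) (b : List Int) (c : List Int) (out : Int) : Decidable (Spec_tripletCount a b c out) := by unfold Spec_tripletCount; infer_instance

-- ===== CLAIM (what is proved, stated in full; the proofs are below) =====
def Claim_equal_tripletCount : Prop := ∀ (a : List Int) (b : List Int) (c : List Int), Dom_tripletCount a b c → Spec_tripletCount a b c (tripletCount a b c)

-- ===== LEMMAS AND PROOFS =====

-- sign/magnitude coding of Python ints: pvOfCode s n = (if s then -n-1 else n)
def pvOfCode (s : Bool) (n : Nat) : Int := if s then -(n : Int) - 1 else n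
def pvMag (a : Int) : Nat := if 0 ≤ a then a.toNat else (-a - 1).toNat

-- shorthand for the per-(x,y) inner count both reductions reach
def pvInner (x y : Int) (c : List Int) : Int :=
  (c.countP (fun z => pvFun1 (PySem.Int.bxor (PySem.Int.bxor x y) z)) : Int)

theorem pvMag_ofCode (s : Bool) (n : Nat) : pvMag (pvOfCode s n) = n := by
  cases s <;> simp [pvOfCode, pvMag] <;> omega

theorem pv_lt_ofCode (s : Bool) (n : Nat) : decide (pvOfCode s n < 0) = s := by
  cases s <;> simp [pvOfCode] <;> omega

theorem pv_bxor_code (a b : Int) :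
    PySem.Int.bxor a b = pvOfCode (xor (decide (a < 0)) (decide (b < 0))) (pvMag a ^^^ pvMag b) := by
  by_cases ha : 0 ≤ a <;> by_cases hb : 0 ≤ b <;>
    simp [PySem.Int.bxor, pvOfCode, pvMag, ha, hb] <;> omega

theorem pv_bxor_assoc (a b c : Int) :
    PySem.Int.bxor (PySem.Int.bxor a b) c = PySem.Int.bxor a (PySem.Int.bxor b c) := by
  rw [pv_bxor_code a b, pv_bxor_code b c, pv_bxor_code, pv_bxor_code, pvMag_ofCode, pvMag_ofCode,
    pv_lt_ofCode, pv_lt_ofCode, Bool.xor_assoc, Nat.xor_assoc]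

-- the two parity tests agree: the first two characters of bin(v) are never '1'
theorem pvFun1_eq (v : Int) : pvFun1 v = pvEvenPopcount v := by
  unfold pvFun1 pvEvenPopcount pvBin
  by_cases h : v < 0 <;> simp [h]

-- fun2 on the 3-element list A builds is the xor of its elements
theorem pvFun2_triple (x y z : Int) :
    pvFun2 [x, y, z] = PySem.Int.bxor (PySem.Int.bxor x y) z := by
  simp [pvFun2, PySem.List.pyRange, PySem.List.pyGetD, PySem.List.len, List.range_succ,
    PySem.List.pyGet?, PySem.List.pyIdx?]

-- a fold whose step adds g x accumulates init + Σ g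
theorem pv_foldl_sum {α : Type} (l : List α) (f : Int → α → Int) (g : α → Int)
    (h : ∀ acc x, f acc x = acc + g x) : ∀ init : Int, l.foldl f init = init + (l.map g).sum := by
  induction l with
  | nil => simp
  | cons hd tl ih =>
    intro init
    rw [List.foldl_cons, h init hd, ih (init + g hd)]
    simp [add_assoc]

-- sum of an if-guarded map is the sum over the filtered list
theorem pv_sum_map_ite {α : Type} (q : α → Bool) (f : α → Nat) (l : List α) :
    (l.map (fun k => if q k then f k else 0)).sum = ((l.filter q).map f).sum := by
  induction l with
  | nil => rfl
  | cons hd tl ih => by_cases h : q hd <;> simp [h, ih]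

-- Σ_{k ∈ distinct L, q k} count_L k = countP q L
theorem pv_sum_ofList_count (L : List Int) (q : Int → Bool) :
    ((PySem.Set.ofList L).map (fun k => if q k then (L.count k : Int) else 0)).sum
      = (L.countP q : Int) := by
  have hperm : (PySem.Set.ofList L).Perm L.dedup :=
    (List.perm_ext_iff_of_nodup (PySem.Set.nodup_ofList L) L.nodup_dedup).mpr
      (by intro k; simp [PySem.Set.mem_ofList, List.mem_dedup])
  rw [List.Perm.sum_eq (hperm.map _)]
  have hcast : ∀ (l : List Int),
      (l.map (fun k => if q k then (L.count k : Int) else 0)).sum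
        = (((l.map (fun k => if q k then L.count k else 0)).sum : Nat) : Int) := by
    intro l
    induction l with
    | nil => simp
    | cons hd tl ih => by_cases h : q hd <;> simp [h, ih]
  rw [hcast, pv_sum_map_ite, List.sum_map_count_dedup_filter_eq_countP]

-- B's counting loop builds Counter(b[j] ^ c[k] for j, k)
theorem pv_cnt_eq (b c : List Int) :
    b.foldl (fun d y => c.foldl (fun d z =>
        let w := PySem.Int.bxor y z
        d.insert w (d.getD w 0 + 1)) d) PySem.Dict.empty
      = PySem.Dict.counter (b.flatMap (fun y => c.map (fun z => PySem.Int.bxor y z))) := by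
  rw [← PySem.Dict.foldl_insert_getD_add_one_eq_counter, List.foldl_flatMap]
  simp [List.foldl_map]

-- B's inner loop over the counter items adds countP of the flat xor list
theorem pv_items_fold (L : List Int) (q : Int → Bool) (init : Int) :
    (PySem.Dict.counter L).items.foldl
        (fun ans p => if q p.1 then ans + p.2 else ans) init
      = init + (L.countP q : Int) := by
  rw [PySem.Dict.items_counter, List.foldl_map]
  have hfg : (fun (ans : Int) (k : Int) => if q k then ans + (L.count k : Int) else ans)
      = (fun ans k => ans + (if q k then (L.count k : Int) else 0)) := by
    funext ans k; by_cases h : q k <;> simp [h]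
  rw [hfg, pv_foldl_sum _ _ _ (fun _ _ => rfl), pv_sum_ofList_count]

-- A's innermost loop counts the matching z's
theorem pv_lvl3 (x y : Int) (c : List Int) (init : Int) :
    (PySem.List.pyRange 0 (PySem.List.len c) 1).foldl (fun ans k =>
        if pvFun1 (pvFun2 [x, y, PySem.List.pyGetD c k 0]) then ans + 1 else ans) init
      = init + pvInner x y c := by
  rw [PySem.List.foldl_pyRange_zero_pyGetD c 0
    (fun ans z => if pvFun1 (pvFun2 [x, y, z]) then ans + 1 else ans) init]
  have hfg : (fun (ans : Int) (z : Int) => if pvFun1 (pvFun2 [x, y, z]) then ans + 1 else ans)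
      = (fun ans z => if pvFun1 (PySem.Int.bxor (PySem.Int.bxor x y) z) then ans + 1 else ans) := by
    funext ans z; rw [pvFun2_triple]
  rw [hfg, PySem.List.foldl_if_add_one]
  rfl

-- A's middle loop sums the inner counts over b
theorem pv_lvl2 (x : Int) (b c : List Int) (init : Int) :
    (PySem.List.pyRange 0 (PySem.List.len b) 1).foldl (fun ans j =>
      (PySem.List.pyRange 0 (PySem.List.len c) 1).foldl (fun ans k =>
        if pvFun1 (pvFun2 [x, PySem.List.pyGetD b j 0, PySem.List.pyGetD c k 0])
        then ans + 1 else ans) ans) init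
      = init + (b.map (fun y => pvInner x y c)).sum := by
  rw [PySem.List.foldl_pyRange_zero_pyGetD b 0
    (fun ans y => (PySem.List.pyRange 0 (PySem.List.len c) 1).foldl (fun ans k =>
      if pvFun1 (pvFun2 [x, y, PySem.List.pyGetD c k 0]) then ans + 1 else ans) ans) init]
  exact pv_foldl_sum b _ _ (fun acc y => pv_lvl3 x y c acc) init

-- A's value, reduced to nested sums
theorem pv_A_eq (a b c : List Int) :
    tripletCount a b c = (a.map (fun x => (b.map (fun y => pvInner x y c)).sum)).sum := by
  unfold tripletCount
  rw [PySem.List.foldl_pyRange_zero_pyGetD a 0 (fun ans x =>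
    (PySem.List.pyRange 0 (PySem.List.len b) 1).foldl (fun ans j =>
      (PySem.List.pyRange 0 (PySem.List.len c) 1).foldl (fun ans k =>
        if pvFun1 (pvFun2 [x, PySem.List.pyGetD b j 0, PySem.List.pyGetD c k 0])
        then ans + 1 else ans) ans) ans) 0]
  rw [pv_foldl_sum a _ _ (fun acc x => pv_lvl2 x b c acc), zero_add]

-- B's value, reduced to the same nested sums
theorem pv_B_eq (a b c : List Int) :
    tripletCount_alt a b c = (a.map (fun x => (b.map (fun y => pvInner x y c)).sum)).sum := by
  unfold tripletCount_alt
  simp only [pv_cnt_eq]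
  have hstep : ∀ (acc x : Int),
      (PySem.Dict.counter (b.flatMap (fun y => c.map (fun z => PySem.Int.bxor y z)))).items.foldl
          (fun ans p => if pvEvenPopcount (PySem.Int.bxor x p.1) then ans + p.2 else ans) acc
        = acc + (b.map (fun y => pvInner x y c)).sum := by
    intro acc x
    rw [pv_items_fold _ (fun w => pvEvenPopcount (PySem.Int.bxor x w)) acc]
    congr 1
    rw [List.countP_flatMap]
    have : ∀ y, ((List.countP (fun w => pvEvenPopcount (PySem.Int.bxor x w)) ∘
        fun y => c.map (fun z => PySem.Int.bxor y z)) y : Int) = pvInner x y c := by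
      intro y
      simp only [Function.comp_apply, List.countP_map, pvInner]
      congr 1
      refine List.countP_congr (fun z _ => ?_)
      simp only [Function.comp_apply]
      rw [pvFun1_eq, pv_bxor_assoc]
    induction b with
    | nil => simp
    | cons hd tl ih =>
      simp only [List.map_cons, List.sum_cons, Nat.cast_add, ih, this hd]
  rw [pv_foldl_sum a _ _ hstep, zero_add]

-- ===== VERDICT (by name: the statement is the Claim_ definition above) =====
theorem tripletCount_spec : Claim_equal_tripletCount := by
  intro a b c _
  unfold Spec_tripletCount
  rw [pv_A_eq, pv_B_eq]
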